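-- pv_equiv track=rewrite | github.com/ngkhnghia/Exam_Python_KTeam | Bai84.py | timPhanTuLonNhat
-- ===== SOURCE A (Python) =====
-- def timPhanTuLonNhat(arr):
--     max_ = max(arr)
--     count = arr.count(max_)
--     index = []
--     for i in range(len(arr)):
--         if arr[i] == max_:
--             index.append(i)
--     return max_, count, index
-- ===== SOURCE B (Python) =====
-- def timPhanTuLonNhat(arr):
--     if not arr:
--         raise ValueError("max() arg is an empty sequence")
--     max_, count, index = arr[0], 1, [0]
--     for i, v in enumerate(arr[1:], start=1):
--         if v > max_:
--             max_, count, index = v, 1, [i]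
--         elif v == max_:
--             count += 1
--             index.append(i)
--     return max_, count, index
-- ===== Notes on version B (the rewrite author's own statement) =====
-- stated objective: alternative
-- what changed: Replaces A's three separate passes (max(), arr.count(), an index-scanning loop) by one left-to-right pass over enumerate that maintains the running max, its count and its index list together.
-- outside the precondition, e.g. on timPhanTuLonNhat([]): A raises ValueError, B raises ValueError
import Mathlib
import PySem

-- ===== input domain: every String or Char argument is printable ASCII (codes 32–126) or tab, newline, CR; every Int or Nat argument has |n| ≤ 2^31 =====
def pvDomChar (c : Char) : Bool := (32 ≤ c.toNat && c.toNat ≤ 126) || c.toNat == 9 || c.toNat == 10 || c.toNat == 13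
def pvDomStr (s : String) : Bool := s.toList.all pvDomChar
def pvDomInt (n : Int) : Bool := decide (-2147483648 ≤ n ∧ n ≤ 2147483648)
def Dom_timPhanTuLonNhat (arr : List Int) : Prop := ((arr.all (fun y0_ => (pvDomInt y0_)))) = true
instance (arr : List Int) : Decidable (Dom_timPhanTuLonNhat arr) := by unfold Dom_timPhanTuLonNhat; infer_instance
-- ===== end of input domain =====

-- B replaces A's three passes (max, count, index scan) by one fold keeping the
-- running max, its count and its index list together (objective: alternative).

-- ===== PORT A =====
def timPhanTuLonNhat (arr : List Int) : Int × Int × List Int :=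
  match PySem.List.max? arr (fun y => y) with
  | none => (0, 0, [])  -- Python raises ValueError here (empty arr); excluded by Pre_
  | some m =>
    let count : Int := (PySem.List.count arr m : Int)
    let index : List Int :=
      (PySem.List.pyRange 0 (PySem.List.len arr) 1).foldl
        (fun acc i => if PySem.List.pyGetD arr i 0 = m then acc ++ [i] else acc) []
    (m, count, index)

-- ===== PORT B =====
-- one loop step of B: state (max_, count, index), element (i, v)
def pvAltStep (s : Int × Int × List Int) (p : Int × Int) : Int × Int × List Int :=
  if p.2 > s.1 then (p.2, 1, [p.1])
  else if p.2 = s.1 then (s.1, s.2.1 + 1, s.2.2 ++ [p.1])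
  else s

def timPhanTuLonNhat_alt (arr : List Int) : Int × Int × List Int :=
  match arr with
  | [] => (0, 0, [])  -- Python B raises ValueError here; excluded by Pre_
  | x :: xs => (PySem.List.enumerate xs 1).foldl pvAltStep (x, 1, [0])

-- ===== PRECONDITION & SPEC =====
-- Pre_ excludes exactly the empty list, on which A's max([]) raises ValueError (and B raises too).
def Pre_timPhanTuLonNhat (arr : List Int) : Prop := arr ≠ []
instance (arr : List Int) : Decidable (Pre_timPhanTuLonNhat arr) := by unfold Pre_timPhanTuLonNhat; infer_instance
def pvWitness_timPhanTuLonNhat : List Int := [3, 1, 3]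

def Spec_timPhanTuLonNhat (arr : List Int) (out : Int × Int × List Int) : Prop := out = timPhanTuLonNhat_alt arr
instance (arr : List Int) (out : Int × Int × List Int) : Decidable (Spec_timPhanTuLonNhat arr out) := by unfold Spec_timPhanTuLonNhat; infer_instance

-- ===== CLAIM (what is proved, stated in full; the proofs are below) =====
def Claim_equal_timPhanTuLonNhat : Prop := ∀ (arr : List Int), Dom_timPhanTuLonNhat arr → Pre_timPhanTuLonNhat arr → Spec_timPhanTuLonNhat arr (timPhanTuLonNhat arr)

-- ===== LEMMAS AND PROOFS =====

-- positions (as Python ints, starting at offset i) of the value M in l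
def pvPos (i : Int) (l : List Int) (M : Int) : List Int :=
  match l with
  | [] => []
  | v :: r => if v = M then i :: pvPos (i + 1) r M else pvPos (i + 1) r M

-- characterisation of B's fold
lemma foldl_pvAltStep (l : List Int) : ∀ (m c : Int) (idx : List Int) (i : Int),
    (PySem.List.enumerate l i).foldl pvAltStep (m, c, idx) =
      (l.foldl max m,
       (if l.foldl max m = m then c + (l.count m : Int) else (l.count (l.foldl max m) : Int)),
       (if l.foldl max m = m then idx else []) ++ pvPos i l (l.foldl max m)) := by
  induction l with
  | nil => intro m c idx i; simp [PySem.List.enumerate_nil, pvPos]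
  | cons v r ih =>
    intro m c idx i
    rw [PySem.List.enumerate_cons, List.foldl_cons]
    have hle : ∀ a : Int, a ≤ r.foldl max a := fun a => (PySem.List.le_foldl_max r a).1
    by_cases hgt : v > m
    · have hmv : max m v = v := by omega
      have hstep : pvAltStep (m, c, idx) (i, v) = (v, 1, [i]) := by
        simp [pvAltStep, hgt]
      rw [hstep, ih]
      have hMm : ¬ r.foldl max v = m := by
        have := hle v; intro h; omega
      simp only [List.foldl_cons, hmv, hMm, if_false]
      refine Prod.ext rfl (Prod.ext ?_ ?_)
      · by_cases hMv : r.foldl max v = v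
        · simp [hMv]; omega
        · have hvm : ¬ (v = r.foldl max v) := fun h => hMv h.symm
          simp [hMv, hvm]
      · by_cases hMv : r.foldl max v = v
        · simp [hMv, pvPos]
        · have hvm : ¬ (v = r.foldl max v) := fun h => hMv h.symm
          simp [hMv, pvPos, hvm]
    · have hmv : max m v = m := by omega
      by_cases heq : v = m
      · have hstep : pvAltStep (m, c, idx) (i, v) = (m, c + 1, idx ++ [i]) := by
          simp [pvAltStep, hgt, heq]
        rw [hstep, ih]
        simp only [List.foldl_cons, hmv]
        refine Prod.ext rfl (Prod.ext ?_ ?_)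
        · by_cases hMm : r.foldl max m = m
          · simp [hMm, heq]; ring
          · have : ¬ (v = r.foldl max m) := by rw [heq]; intro h; exact hMm h.symm
            simp [hMm, this]
        · by_cases hMm : r.foldl max m = m
          · have : v = r.foldl max m := by rw [heq, hMm]
            simp [hMm, pvPos, this]
          · have : ¬ (v = r.foldl max m) := by rw [heq]; intro h; exact hMm h.symm
            simp [hMm, pvPos, this]
      · have hstep : pvAltStep (m, c, idx) (i, v) = (m, c, idx) := by
          have h1 : ¬ (v > m) := hgt
          simp [pvAltStep, h1, heq]
        rw [hstep, ih]
        simp only [List.foldl_cons, hmv]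
        have hvM : ¬ (v = r.foldl max m) := by
          have := hle m; intro h; omega
        refine Prod.ext rfl (Prod.ext ?_ ?_)
        · by_cases hMm : r.foldl max m = m
          · simp [hMm, List.count_cons]
            exact heq
          · simp [hMm, hvM]
        · by_cases hMm : r.foldl max m = m <;> simp [hMm, pvPos, hvM, heq]
    
-- A's filtered index list, expressed as pvPos
lemma pvPos_eq_filter (l : List Int) (M : Int) : ∀ i : Int,
    pvPos i l M = ((List.range l.length).filter (fun k => decide (l.getD k 0 = M))).map (fun k : Nat => i + (k : Int)) := by
  induction l with
  | nil => intro i; simp [pvPos]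
  | cons v r ih =>
    intro i
    have hp : ((fun k => decide ((v :: r).getD k 0 = M)) ∘ Nat.succ) = (fun k => decide (r.getD k 0 = M)) := by
      funext k; simp
    have htail : ((List.range r.length).filter (fun k => decide (r.getD k 0 = M))).map
          ((fun k : Nat => i + (k : Int)) ∘ Nat.succ)
        = pvPos (i + 1) r M := by
      rw [ih (i + 1)]
      apply List.map_congr_left
      intro k _
      simp [Function.comp]
      ring
    rw [List.length_cons, List.range_succ_eq_map, List.filter_cons, List.filter_map, hp]
    by_cases hv : v = M
    · rw [if_pos (by simp [hv]), List.map_cons, List.map_map, htail]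
      simp [pvPos, hv]
    · rw [if_neg (by simp [hv]), List.map_map, htail]
      simp [pvPos, hv]

-- ===== VERDICT (by name: the statement is the Claim_ definition above) =====
theorem timPhanTuLonNhat_spec : Claim_equal_timPhanTuLonNhat := by
  intro arr _ hpre
  unfold Spec_timPhanTuLonNhat
  match arr with
  | [] => exact absurd rfl hpre
  | x :: xs =>
    unfold timPhanTuLonNhat timPhanTuLonNhat_alt
    rw [PySem.List.max?_id_cons]
    dsimp only
    rw [foldl_pvAltStep]
    set M := xs.foldl max x with hM
    refine Prod.ext rfl (Prod.ext ?_ ?_)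
    · -- counts agree
      by_cases hMx : M = x
      · simp only [hMx]
        simp
        omega
      · have hxM : ¬ (x = M) := fun h => hMx h.symm
        simp [hMx, hxM]
    · -- index lists agree
      have hrange : PySem.List.pyRange 0 (PySem.List.len (x :: xs)) 1
          = (List.range (x :: xs).length).map (fun k : Nat => ((0 : Int) + (k : Int))) := by
        rw [PySem.List.pyRange_one]
        simp
      rw [PySem.List.foldl_append_ite_eq_filter, List.nil_append, hrange, List.filter_map]
      have hfun : ((fun i => decide (PySem.List.pyGetD (x :: xs) i 0 = M)) ∘ fun k : Nat => ((0 : Int) + (k : Int)))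
          = fun k : Nat => decide ((x :: xs).getD k 0 = M) := by
        funext k
        rw [Function.comp_apply, zero_add, PySem.List.pyGetD_natCast]
      rw [hfun, ← pvPos_eq_filter (x :: xs) M 0]
      by_cases hMx : M = x
      · rw [if_pos hMx]
        simp [pvPos, hMx.symm]
      · have hxM : ¬ (x = M) := fun h => hMx h.symm
        simp [pvPos, hxM, hMx]
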